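-- pv_equiv track=rewrite | github.com/GraySinclair/lc-data | python/class-15/exercise/functions-exercises.py | inverse_triangle
-- ===== SOURCE A (Python) =====
-- def make_space_line(numSpaces, numChars):
--     line = ' ' * numSpaces + '#' * numChars + ' ' * numSpaces
--     return line
--
-- def inverse_triangle(height):
--     triangleinv = ''
--     counter = height
--     for i in range(height):
--         triangleinv += make_space_line(height - counter +1, counter + counter -1)
--         counter += - 1
--         if i < height - 1:
--             triangleinv += '\n'
--     return triangleinv
-- ===== SOURCE B (Python) =====
-- def inverse_triangle(height):
--     # build the rows bottom-up: start from the single-hash tip, grow the bar by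
--     # two hashes and shrink the padding each step, then emit the rows in reverse
--     rows = []
--     bar = ''
--     pad = height
--     for _ in range(height):
--         bar = bar + '##' if bar else '#'
--         rows.append(' ' * pad + bar + ' ' * pad)
--         pad -= 1
--     return '\n'.join(reversed(rows))
-- ===== Notes on version B (the rewrite author's own statement) =====
-- stated objective: alternative
-- what changed: Builds the triangle back-to-front: starts from the single-hash bottom tip and grows the bar by two hashes while shrinking the padding each step (no per-row width formula, no counter arithmetic, no conditional newline), then reverses the row list and joins once.
import Mathlib
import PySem

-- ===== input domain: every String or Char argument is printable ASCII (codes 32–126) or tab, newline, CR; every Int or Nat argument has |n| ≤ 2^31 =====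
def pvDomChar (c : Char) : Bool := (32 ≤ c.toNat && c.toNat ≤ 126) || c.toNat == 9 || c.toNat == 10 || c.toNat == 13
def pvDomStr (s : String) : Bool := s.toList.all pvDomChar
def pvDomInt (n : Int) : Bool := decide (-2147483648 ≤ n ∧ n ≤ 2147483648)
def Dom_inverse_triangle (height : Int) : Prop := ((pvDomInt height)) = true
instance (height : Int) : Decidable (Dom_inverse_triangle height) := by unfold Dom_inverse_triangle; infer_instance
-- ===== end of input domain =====

-- B builds the triangle back-to-front: the bar grows from the one-hash tip by two
-- hashes a step while the padding shrinks; the rows are reversed and joined once.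

-- ===== PORT A =====
def make_space_line (numSpaces numChars : Int) : List Char :=
  PySem.List.pyRepeat [' '] numSpaces ++ PySem.List.pyRepeat ['#'] numChars
    ++ PySem.List.pyRepeat [' '] numSpaces

def inverse_triangle (height : Int) : String :=
  String.ofList
    ((PySem.List.pyRange 0 height 1).foldl
      (fun (st : List Char × Int) i =>
        let t := st.1 ++ make_space_line (height - st.2 + 1) (st.2 + st.2 - 1)
        let t := if i < height - 1 then t ++ ['\n'] else t
        (t, st.2 + (-1)))
      ([], height)).1

-- ===== PORT B =====
def inverse_triangle_alt (height : Int) : String :=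
  let st := (PySem.List.pyRange 0 height 1).foldl
    (fun (st : List (List Char) × List Char × Int) _ =>
      let bar := if st.2.1 ≠ [] then st.2.1 ++ ['#', '#'] else ['#']
      (st.1 ++ [PySem.List.pyRepeat [' '] st.2.2 ++ bar ++ PySem.List.pyRepeat [' '] st.2.2],
       bar, st.2.2 - 1))
    ([], [], height)
  String.ofList (PySem.Chars.join ['\n'] st.1.reverse)

-- ===== PRECONDITION & SPEC =====
def Spec_inverse_triangle (height : Int) (out : String) : Prop := out = inverse_triangle_alt height
instance (height : Int) (out : String) : Decidable (Spec_inverse_triangle height out) := by unfold Spec_inverse_triangle; infer_instance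

-- ===== CLAIM =====
def Claim_equal_inverse_triangle : Prop := ∀ (height : Int), Dom_inverse_triangle height → Spec_inverse_triangle height (inverse_triangle height)

-- ===== LEMMAS AND PROOFS =====

-- the characters emitted by A's loop over its last k iterations (counter value k down to 1)
def pvTail (height : Int) : Nat → List Char
  | 0 => []
  | k + 1 =>
      make_space_line (height - k) (2 * (k : Int) + 1)
        ++ (if 1 ≤ (k : Int) then ['\n'] else []) ++ pvTail height k

theorem pvTail_spec (height : Int) :
    ∀ (k : Nat), (k : Int) ≤ height → ∀ (acc : List Char),
      ((PySem.List.pyRange (height - k) height 1).foldl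
        (fun (st : List Char × Int) i =>
          let t := st.1 ++ make_space_line (height - st.2 + 1) (st.2 + st.2 - 1)
          let t := if i < height - 1 then t ++ ['\n'] else t
          (t, st.2 + (-1)))
        (acc, (k : Int))).1 = acc ++ pvTail height k := by
  intro k
  induction k with
  | zero =>
      intro _ acc
      rw [PySem.List.pyRange_one_eq_nil (by omega)]
      simp [pvTail]
  | succ k ih =>
      intro hk acc
      rw [PySem.List.pyRange_one_cons (by push_cast; omega)]
      simp only [List.foldl_cons]
      have h5 : (((k : Nat) + 1 : Nat) : Int) = ((k : Int) + 1) := by push_cast; ring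
      rw [h5]
      rw [show height - ((k:Int)+1) + 1 = height - k from by ring,
          show ((k:Int)+1) + ((k:Int)+1) - 1 = 2*(k:Int)+1 from by ring,
          show ((k:Int)+1) + (-1) = (k:Int) from by ring]
      by_cases hc : 1 ≤ (k : Int)
      · rw [if_pos (by omega)]
        rw [ih (by omega)]
        simp [pvTail, hc, List.append_assoc]
      · rw [if_neg (by omega)]
        rw [ih (by omega)]
        simp [pvTail, hc, List.append_assoc]

-- the rows read top-down: bar sizes 2k-1 down to 1, with p, p+1, … spaces each side
def pvSpecRows : Nat → Nat → List (List Char)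
  | 0, _ => []
  | k + 1, p =>
      (List.replicate p ' ' ++ List.replicate (2 * k + 1) '#' ++ List.replicate p ' ')
        :: pvSpecRows k (p + 1)

theorem pvJoin_spec (h : Int) :
    ∀ (k : Nat) (p : Nat), (k : Int) ≤ h → (p : Int) = h - k + 1 →
      PySem.Chars.join ['\n'] (pvSpecRows k p) = pvTail h k := by
  intro k
  induction k with
  | zero =>
      intro p _ _
      simp [pvSpecRows, pvTail, PySem.Chars.join, List.intercalate]
  | succ k ih =>
      intro p hk hp
      have hrow : List.replicate p ' ' ++ List.replicate (2 * k + 1) '#' ++ List.replicate p ' '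
          = make_space_line (h - k) (2 * (k : Int) + 1) := by
        rw [show p = (h - (k : Int)).toNat from by omega,
            show 2 * k + 1 = (2 * (k : Int) + 1).toNat from by omega]
        simp [make_space_line, PySem.List.pyRepeat_singleton, List.append_assoc]
      by_cases hc : 1 ≤ (k : Int)
      · have htail : pvSpecRows k (p + 1) ≠ [] := by
          obtain ⟨k', rfl⟩ : ∃ k', k = k' + 1 := ⟨k - 1, by omega⟩
          simp [pvSpecRows]
        obtain ⟨y, t, hyt⟩ := List.exists_cons_of_ne_nil htail
        simp only [pvSpecRows]
        rw [hyt, PySem.Chars.join_cons_cons, ← hyt,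
            ih (p + 1) (by omega) (by push_cast; omega), hrow]
        simp [pvTail, hc, List.append_assoc]
      · have hk0 : k = 0 := by omega
        subst hk0
        simp only [pvSpecRows]
        rw [PySem.Chars.join_singleton, hrow]
        simp [pvTail]

-- B's row list after j iterations (bottom row first)
def pvBRows (h : Int) : Nat → List (List Char)
  | 0 => []
  | j + 1 =>
      pvBRows h j
        ++ [PySem.List.pyRepeat [' '] (h - j) ++ List.replicate (2 * j + 1) '#'
              ++ PySem.List.pyRepeat [' '] (h - j)]

-- B's bar after j iterations
def pvBar : Nat → List Char
  | 0 => []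
  | j + 1 => List.replicate (2 * j + 1) '#'

-- invariant of B's fold: after j iterations the state is (pvBRows h j, pvBar j, h - j)
theorem pvB_fold (h : Int) :
    ∀ (j : Nat), (j : Int) ≤ h →
      ((PySem.List.pyRange 0 j 1).foldl
        (fun (st : List (List Char) × List Char × Int) _ =>
          let bar := if st.2.1 ≠ [] then st.2.1 ++ ['#', '#'] else ['#']
          (st.1 ++ [PySem.List.pyRepeat [' '] st.2.2 ++ bar ++ PySem.List.pyRepeat [' '] st.2.2],
           bar, st.2.2 - 1))
        ([], [], h))
      = (pvBRows h j, pvBar j, h - j) := by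
  intro j
  induction j with
  | zero =>
      intro _
      rw [PySem.List.pyRange_one_eq_nil (by omega)]
      simp [pvBRows, pvBar]
  | succ j ih =>
      intro hj
      rw [show ((j + 1 : Nat) : Int) = (j : Int) + 1 from by push_cast; ring]
      rw [PySem.List.pyRange_one_append 0 (j : Int) ((j : Int) + 1) (by omega) (by omega),
          PySem.List.pyRange_one_cons (a := (j : Int)) (b := (j : Int) + 1) (by omega),
          PySem.List.pyRange_one_eq_nil (a := (j : Int) + 1) (b := (j : Int) + 1) (by omega)]
      rw [List.foldl_append, ih (by push_cast at hj ⊢; omega)]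
      simp only [List.foldl_cons, List.foldl_nil]
      have hbar : (if pvBar j ≠ [] then pvBar j ++ ['#', '#'] else ['#'])
          = List.replicate (2 * j + 1) '#' := by
        cases j with
        | zero => simp [pvBar, List.replicate]
        | succ j' =>
            rw [if_pos (by simp [pvBar])]
            simp only [pvBar]
            rw [show 2 * (j' + 1) + 1 = (2 * j' + 1) + 1 + 1 from by ring,
                List.replicate_succ' (n := 2 * j' + 1 + 1), List.replicate_succ' (n := 2 * j' + 1)]
            simp
      rw [hbar]
      simp only [pvBRows, pvBar]
      rw [show h - (j : Int) - 1 = h - ((j : Int) + 1) from by ring]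

-- reversing B's bottom-up rows yields the top-down rows
theorem pvBRows_reverse (h : Int) :
    ∀ (k : Nat) (p : Nat), (k : Int) ≤ h → (p : Int) = h - k + 1 →
      (pvBRows h k).reverse = pvSpecRows k p := by
  intro k
  induction k with
  | zero => intro p _ _; simp [pvBRows, pvSpecRows]
  | succ k ih =>
      intro p hk hp
      simp only [pvBRows, List.reverse_append, List.reverse_cons, List.reverse_nil,
        List.nil_append, List.cons_append]
      simp only [pvSpecRows]
      congr 1
      · rw [show h - (k : Int) = ((p : Int)) from by push_cast at hp ⊢; omega,
            PySem.List.pyRepeat_singleton]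
        simp
      · exact ih (p + 1) (by push_cast at hk ⊢; omega) (by push_cast at hp ⊢; omega)

-- ===== VERDICT =====
theorem inverse_triangle_spec : Claim_equal_inverse_triangle := by
  intro height _
  unfold Spec_inverse_triangle inverse_triangle inverse_triangle_alt
  by_cases hpos : 0 ≤ height
  · obtain ⟨n, rfl⟩ : ∃ n : Nat, height = (n : Int) := ⟨height.toNat, by omega⟩
    rw [show (0 : Int) = (n : Int) - (n : Int) from by ring]
    rw [pvTail_spec (n : Int) n (le_refl _) []]
    simp only
    rw [show ((n : Int) - (n : Int)) = (0 : Int) from by ring]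
    rw [pvB_fold (n : Int) n (le_refl _)]
    rw [pvBRows_reverse (n : Int) n 1 (le_refl _) (by push_cast; ring),
        pvJoin_spec (n : Int) n 1 (le_refl _) (by push_cast; ring)]
    simp
  · rw [PySem.List.pyRange_one_eq_nil (by omega)]
    simp [PySem.Chars.join, List.intercalate]
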